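-- pv_equiv track=rewrite | github.com/Princeton21/Data-Structures-and-Algorithms | Code/patterns/using_asterix and hash/hour_glass.py | hourglass
-- ===== SOURCE A (Python) =====
-- def row_check(rows):
--     if rows < 0:
--         raise ValueError("Rows are less tha 0.")
--
-- def hourglass(rows):
--     """
--     Function to create an hourglass pattern
--     Tests:
--     >>> hourglass(2)
--     ***
--      *
--     ***
--     >>> hourglass(5)
--     *********
--      *******
--       *****
--        ***
--         *
--        ***
--       *****
--      *******
--     *********
--     """
--     row_check(rows)
--     column = (rows * 2) - 1
--     pattern = []
--
--     for x in range(1, rows + 1):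
--         length = x * 2 - 1
--         string = "*" * length
--         pattern.append(string.center(column))
--
--     pattern = pattern[::-1] + pattern[1::]
--     pattern = "\n".join(pattern)
--     return pattern
-- ===== SOURCE B (Python) =====
-- def row_check(rows):
--     if rows < 0:
--         raise ValueError("Rows are less tha 0.")
--
-- def hourglass(rows):
--     """Hourglass pattern: one symmetric pass over all 2*rows-1 lines
--     (width from distance to the middle row) instead of building the top
--     half and mirroring it."""
--     row_check(rows)
--     column = 2 * rows - 1
--     lines = [("*" * (2 * abs(i - (rows - 1)) + 1)).center(column)
--              for i in range(column)]
--     return "\n".join(lines)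
-- ===== Notes on version B (the rewrite author's own statement) =====
-- stated objective: simpler
-- what changed: B produces every line in one symmetric pass (width = 2*|i-(rows-1)|+1 for i in range(2*rows-1)) instead of building the top half and then reversing and re-concatenating it.
import Mathlib
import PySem

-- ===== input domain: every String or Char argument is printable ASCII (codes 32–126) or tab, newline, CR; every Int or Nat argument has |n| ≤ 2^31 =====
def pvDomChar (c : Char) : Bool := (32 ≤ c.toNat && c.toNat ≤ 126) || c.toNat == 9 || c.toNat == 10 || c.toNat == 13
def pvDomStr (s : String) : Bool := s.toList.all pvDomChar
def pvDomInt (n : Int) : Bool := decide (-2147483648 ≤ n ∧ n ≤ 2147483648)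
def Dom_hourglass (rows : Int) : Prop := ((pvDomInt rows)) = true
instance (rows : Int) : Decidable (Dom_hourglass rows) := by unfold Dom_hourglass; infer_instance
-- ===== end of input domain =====

-- B builds every line in one symmetric pass (width from the distance to the middle row)
-- instead of A's build-top-half-then-reverse-and-concatenate; same output, simpler decomposition.

-- Hand port of CPython's str.center(width) (PySem has no center); exact:
-- if width <= len(s) return s; else marg = width - len, left = marg//2 + (marg & width & 1),
-- and in the else branch marg, width ≥ 0, so (marg & width & 1) = 1 iff both marg and width are odd.
def pyCenter (s : String) (w : Int) : String :=
  let n : Int := PySem.Str.len s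
  if w ≤ n then s
  else
    let marg := w - n
    let left := PySem.Int.floordiv marg 2 +
      (if PySem.Int.mod marg 2 = 1 ∧ PySem.Int.mod w 2 = 1 then (1 : Int) else 0)
    String.mk (List.replicate left.toNat ' ' ++ s.toList ++ List.replicate (marg - left).toNat ' ')

-- ===== PORT A =====
def hourglass (rows : Int) : String :=
  -- row_check(rows): raises ValueError iff rows < 0; those inputs are outside Pre_hourglass
  let column := rows * 2 - 1
  let pattern := (PySem.List.pyRange 1 (rows + 1) 1).foldl
    (fun acc x =>
      acc ++ [pyCenter (String.mk (List.replicate (x * 2 - 1).toNat '*')) column]) []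
  let pattern2 := ((PySem.List.slice? pattern none none (-1)).getD []) ++  -- pattern[::-1] (step ≠ 0: never none)
    PySem.List.slice pattern (some 1) none                                 -- pattern[1::]
  PySem.Str.join "\n" pattern2

-- ===== PORT B =====
def hourglass_alt (rows : Int) : String :=
  -- row_check(rows): raises ValueError iff rows < 0; those inputs are outside Pre_hourglass
  let column := 2 * rows - 1
  let lines := (PySem.List.pyRange 0 column 1).map
    (fun i => pyCenter (String.mk (List.replicate (2 * |i - (rows - 1)| + 1).toNat '*')) column)
  PySem.Str.join "\n" lines

-- ===== PRECONDITION & SPEC =====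
-- Pre_: exactly the inputs on which A returns (row_check raises ValueError for rows < 0).
def Pre_hourglass (rows : Int) : Prop := 0 ≤ rows
instance (rows : Int) : Decidable (Pre_hourglass rows) := by unfold Pre_hourglass; infer_instance
def pvWitness_hourglass : Int := (3)

def Spec_hourglass (rows : Int) (out : String) : Prop := out = hourglass_alt rows
instance (rows : Int) (out : String) : Decidable (Spec_hourglass rows out) := by unfold Spec_hourglass; infer_instance

-- ===== CLAIM (what is proved, stated in full; the proofs are below) =====
def Claim_equal_hourglass : Prop := ∀ (rows : Int), Dom_hourglass rows → Pre_hourglass rows → Spec_hourglass rows (hourglass rows)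

-- ===== LEMMAS AND PROOFS =====

theorem pyCenter_congr (a b c d : Int) (h1 : a = b) (h2 : c = d) :
    pyCenter (String.mk (List.replicate a.toNat '*')) c
      = pyCenter (String.mk (List.replicate b.toNat '*')) d := by rw [h1, h2]

-- A's reversed-top-half-plus-tail list equals B's single symmetric pass, elementwise.
theorem hourglass_lists (n : Nat) :
    ((PySem.List.pyRange 1 ((n : Int) + 1) 1).map
        (fun x => pyCenter (String.mk (List.replicate (x * 2 - 1).toNat '*')) ((n : Int) * 2 - 1))).reverse
      ++ ((PySem.List.pyRange 1 ((n : Int) + 1) 1).map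
        (fun x => pyCenter (String.mk (List.replicate (x * 2 - 1).toNat '*')) ((n : Int) * 2 - 1))).tail
    = (PySem.List.pyRange 0 (2 * (n : Int) - 1) 1).map
        (fun i => pyCenter (String.mk (List.replicate (2 * |i - ((n : Int) - 1)| + 1).toNat '*')) (2 * (n : Int) - 1)) := by
  simp only [PySem.List.pyRange_one, List.map_map]
  apply List.ext_getElem
  · simp; omega
  · intro j hj1 hj2
    simp only [List.length_map, List.length_range] at hj2
    rw [List.getElem_append]
    split
    · next h =>
      simp only [List.length_reverse, List.length_map, List.length_range] at h
      rw [List.getElem_reverse]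
      simp only [List.getElem_map, List.getElem_range, Function.comp_apply, List.length_map,
        List.length_range]
      exact pyCenter_congr _ _ _ _ (by simp only [Int.abs_eq_natAbs]; omega) (by omega)
    · next h =>
      simp only [List.length_reverse, List.length_map, List.length_range] at h
      rw [List.getElem_tail]
      simp only [List.getElem_map, List.getElem_range, Function.comp_apply, List.length_map,
        List.length_range, List.length_reverse]
      exact pyCenter_congr _ _ _ _ (by rw [abs_of_nonneg (by omega)]; omega) (by omega)

-- ===== VERDICT (by name: the statement is the Claim_ definition above) =====
theorem hourglass_spec : Claim_equal_hourglass := by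
  intro rows _ hpre
  obtain ⟨n, rfl⟩ : ∃ n : Nat, rows = (n : Int) := ⟨rows.toNat, (Int.toNat_of_nonneg hpre).symm⟩
  show hourglass (n : Int) = hourglass_alt (n : Int)
  simp only [hourglass, hourglass_alt, PySem.List.foldl_append_singleton_eq_map,
    PySem.List.slice?_none_none_neg_one, PySem.List.slice_from_one, Option.getD_some]
  exact congrArg (PySem.Str.join "\n") (hourglass_lists n)
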